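-- pv_equiv track=rewrite | github.com/SrinivasSurisetti/GFG | Difficulty: Easy/2 Sum – Count distinct pairs with given sum/2-sum-count-distinct-pairs-with-given-sum.py | countDistinctPairs
-- ===== SOURCE A (Python) =====
-- def countDistinctPairs(arr, target):
--     #Your code here
--     seen = set()
--     unique_pairs = set()
--
--     for num in arr:
--         complement = target - num
--         if complement in seen:
--             unique_pairs.add(tuple(sorted((num,complement)))) #for () purpose i use tuple
--         seen.add(num)
--     return len(unique_pairs)
-- ===== SOURCE B (Python) =====
-- def countDistinctPairs(arr, target):
--     freq = {}
--     for x in arr: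
--         freq[x] = freq.get(x, 0) + 1
--     count = 0
--     for num in freq:
--         comp = target - num
--         if num < comp and comp in freq:
--             count += 1
--         elif num == comp and freq[num] >= 2:
--             count += 1
--     return count
-- ===== Notes on version B (the rewrite author's own statement) =====
-- stated objective: simpler
-- what changed: Replaces A's incremental seen-set plus pair-set accumulation with a frequency table built once, followed by a single pass over the distinct values counting each unordered pair exactly at its smaller element (requiring count >= 2 when the value is its own complement).
import Mathlib
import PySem

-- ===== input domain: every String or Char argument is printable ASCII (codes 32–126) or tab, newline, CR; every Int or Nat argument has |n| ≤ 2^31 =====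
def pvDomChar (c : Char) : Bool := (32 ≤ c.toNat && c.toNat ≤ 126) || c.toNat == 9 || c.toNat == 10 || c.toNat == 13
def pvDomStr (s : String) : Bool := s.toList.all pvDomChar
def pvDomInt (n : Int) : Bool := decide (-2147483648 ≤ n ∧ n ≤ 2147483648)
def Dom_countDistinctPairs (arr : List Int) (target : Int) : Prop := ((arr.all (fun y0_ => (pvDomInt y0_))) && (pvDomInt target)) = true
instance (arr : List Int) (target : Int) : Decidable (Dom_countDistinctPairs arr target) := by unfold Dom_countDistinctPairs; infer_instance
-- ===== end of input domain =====

-- B replaces A's incremental seen-set + pair-set scan by a frequency table plus one pass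
-- over the distinct values (objective: simpler, one counting structure instead of two sets).

-- ===== PORT A =====
-- tuple(sorted((num, complement))) on a 2-tuple: exactly (min, max); hand-ported, exact for two ints
def pvSortPair (a b : Int) : Int × Int := if a ≤ b then (a, b) else (b, a)

def countDistinctPairs (arr : List Int) (target : Int) : Int :=
  let st := arr.foldl
    (fun (st : PySem.Set Int × PySem.Set (Int × Int)) num =>
      let complement := target - num
      let pairs := if PySem.Set.contains st.1 complement
                   then PySem.Set.add st.2 (pvSortPair num complement)
                   else st.2
      (PySem.Set.add st.1 num, pairs))
    (PySem.Set.empty, PySem.Set.empty)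
  PySem.Set.len st.2

-- ===== PORT B =====
def countDistinctPairs_alt (arr : List Int) (target : Int) : Int :=
  let freq : PySem.Dict Int Int :=
    arr.foldl (fun d x => d.insert x (d.getD x 0 + 1)) PySem.Dict.empty
  -- freq[num] read with getD: exact here, num is always a key of freq
  freq.keys.foldl
    (fun count num =>
      let comp := target - num
      if num < comp ∧ freq.contains comp then count + 1
      else if num = comp ∧ 2 ≤ freq.getD num 0 then count + 1
      else count)
    (0 : Int)

-- ===== PRECONDITION & SPEC =====
def Spec_countDistinctPairs (arr : List Int) (target : Int) (out : Int) : Prop := out = countDistinctPairs_alt arr target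
instance (arr : List Int) (target : Int) (out : Int) : Decidable (Spec_countDistinctPairs arr target out) := by unfold Spec_countDistinctPairs; infer_instance

-- ===== CLAIM (what is proved, stated in full; the proofs are below) =====
def Claim_equal_countDistinctPairs : Prop := ∀ (arr : List Int) (target : Int), Dom_countDistinctPairs arr target → Spec_countDistinctPairs arr target (countDistinctPairs arr target)

-- ===== LEMMAS AND PROOFS =====

-- the pairs A has collected after scanning a prefix p: (a,b) with a ≤ b, a + b = target,
-- both occurring in p, and occurring twice when a = b
def PairCond (p : List Int) (target a b : Int) : Prop :=
  a + b = target ∧ a ≤ b ∧ a ∈ p ∧ b ∈ p ∧ (a = b → 2 ≤ p.count a)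

lemma pairCond_append (p : List Int) (target a b num : Int) (h : PairCond p target a b) :
    PairCond (p ++ [num]) target a b := by
  obtain ⟨h1, h2, h3, h4, h5⟩ := h
  refine ⟨h1, h2, List.mem_append_left _ h3, List.mem_append_left _ h4, fun hab => ?_⟩
  have := h5 hab
  simp [List.count_append]
  omega

lemma foldA_invariant (target : Int) (l : List Int) :
    ∀ (p : List Int) (seen : PySem.Set Int) (pairs : PySem.Set (Int × Int)),
    (∀ x, x ∈ seen ↔ x ∈ p) →
    (∀ a b, (a, b) ∈ pairs ↔ PairCond p target a b) →
    seen.Nodup → pairs.Nodup →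
    (∀ a b, (a, b) ∈ (l.foldl
        (fun (st : PySem.Set Int × PySem.Set (Int × Int)) num =>
          let complement := target - num
          let pairs := if PySem.Set.contains st.1 complement
                       then PySem.Set.add st.2 (pvSortPair num complement)
                       else st.2
          (PySem.Set.add st.1 num, pairs)) (seen, pairs)).2 ↔ PairCond (p ++ l) target a b)
    ∧ (l.foldl
        (fun (st : PySem.Set Int × PySem.Set (Int × Int)) num =>
          let complement := target - num
          let pairs := if PySem.Set.contains st.1 complement
                       then PySem.Set.add st.2 (pvSortPair num complement)
                       else st.2
          (PySem.Set.add st.1 num, pairs)) (seen, pairs)).2.Nodup := by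
  induction l with
  | nil =>
    intro p seen pairs hs hp hsn hpn
    simpa using ⟨fun a b => by simpa using hp a b, hpn⟩
  | cons num t ih =>
    intro p seen pairs hs hp hsn hpn
    have hcount : ∀ a : Int, (p ++ [num]).count a = p.count a + (if num = a then 1 else 0) := by
      intro a; simp [List.count_append, List.count_cons]
    have hs' : ∀ x, x ∈ PySem.Set.add seen num ↔ x ∈ p ++ [num] := by
      intro x; rw [PySem.Set.mem_add]; simp [hs x]
    have hsn' := PySem.Set.nodup_add seen num hsn
    by_cases hc : (target - num) ∈ p
    · have hred : List.foldl
          (fun (st : PySem.Set Int × PySem.Set (Int × Int)) num =>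
            let complement := target - num
            let pairs := if PySem.Set.contains st.1 complement
                         then PySem.Set.add st.2 (pvSortPair num complement)
                         else st.2
            (PySem.Set.add st.1 num, pairs)) (seen, pairs) (num :: t)
          = List.foldl
          (fun (st : PySem.Set Int × PySem.Set (Int × Int)) num =>
            let complement := target - num
            let pairs := if PySem.Set.contains st.1 complement
                         then PySem.Set.add st.2 (pvSortPair num complement)
                         else st.2
            (PySem.Set.add st.1 num, pairs))
            (PySem.Set.add seen num, PySem.Set.add pairs (pvSortPair num (target - num))) t := by
        simp [(hs (target - num)).mpr hc]
      rw [hred]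
      have hp' : ∀ a b, (a, b) ∈ PySem.Set.add pairs (pvSortPair num (target - num)) ↔
          PairCond (p ++ [num]) target a b := by
        intro a b
        rw [PySem.Set.mem_add]
        constructor
        · rintro (h | h)
          · exact pairCond_append _ _ _ _ _ ((hp a b).mp h)
          · unfold pvSortPair at h
            split_ifs at h with hle
            · rw [Prod.mk.injEq] at h
              obtain ⟨rfl, rfl⟩ := h
              refine ⟨by omega, hle, List.mem_append_right _ (by simp), List.mem_append_left _ hc,
                fun hab => ?_⟩
              rw [hcount]
              have : a ∈ p := by rw [show a = target - a by omega]; exact hc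
              have := List.count_pos_iff.mpr this
              simp; omega
            · rw [Prod.mk.injEq] at h
              obtain ⟨rfl, rfl⟩ := h
              exact ⟨by omega, by omega, List.mem_append_left _ hc,
                List.mem_append_right _ (by simp), fun hab => by omega⟩
        · rintro ⟨h1, h2, h3, h4, h5⟩
          by_cases hap : a ∈ p
          · by_cases hbp : b ∈ p
            · by_cases heq : a = b
              · by_cases h2c : 2 ≤ p.count a
                · exact Or.inl ((hp a b).mpr ⟨h1, h2, hap, hbp, fun _ => h2c⟩)
                · right
                  have h5' := h5 heq
                  rw [hcount] at h5'
                  have hna : num = a := by by_contra hne; simp [hne] at h5'; omega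
                  have hta : target - num = a := by omega
                  unfold pvSortPair
                  rw [if_pos (by omega)]
                  rw [Prod.mk.injEq]; omega
              · exact Or.inl ((hp a b).mpr ⟨h1, h2, hap, hbp, fun hh => absurd hh heq⟩)
            · right
              have hbn : b = num := by
                rcases List.mem_append.mp h4 with h | h
                · exact absurd h hbp
                · simpa using h
              unfold pvSortPair
              split_ifs with hle
              · rw [Prod.mk.injEq]; omega
              · rw [Prod.mk.injEq]; omega
          · right
            have han : a = num := by
              rcases List.mem_append.mp h3 with h | h
              · exact absurd h hap
              · simpa using h
            unfold pvSortPair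
            rw [if_pos (by omega)]
            rw [Prod.mk.injEq]; omega
      have hihr := ih (p ++ [num]) _ _ hs' hp' hsn' (PySem.Set.nodup_add pairs _ hpn)
      simpa only [List.append_assoc, List.singleton_append] using hihr
    · have hred : List.foldl
          (fun (st : PySem.Set Int × PySem.Set (Int × Int)) num =>
            let complement := target - num
            let pairs := if PySem.Set.contains st.1 complement
                         then PySem.Set.add st.2 (pvSortPair num complement)
                         else st.2
            (PySem.Set.add st.1 num, pairs)) (seen, pairs) (num :: t)
          = List.foldl
          (fun (st : PySem.Set Int × PySem.Set (Int × Int)) num =>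
            let complement := target - num
            let pairs := if PySem.Set.contains st.1 complement
                         then PySem.Set.add st.2 (pvSortPair num complement)
                         else st.2
            (PySem.Set.add st.1 num, pairs)) (PySem.Set.add seen num, pairs) t := by
        simp [show target - num ∉ seen from fun h => hc ((hs _).mp h)]
      rw [hred]
      have hp' : ∀ a b, (a, b) ∈ pairs ↔ PairCond (p ++ [num]) target a b := by
        intro a b
        rw [hp]
        constructor
        · exact pairCond_append _ _ _ _ _
        · rintro ⟨h1, h2, h3, h4, h5⟩
          have hap : a ∈ p := by
            rcases List.mem_append.mp h3 with h | h
            · exact h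
            · exfalso
              have han : a = num := by simpa using h
              have hbn : b = num := by
                rcases List.mem_append.mp h4 with hh | hh
                · exact absurd (show (target - num) ∈ p by rw [show target - num = b by omega]; exact hh) hc
                · simpa using hh
              have h5' := h5 (by omega)
              rw [hcount] at h5'
              have : a ∈ p := by
                have : 1 ≤ p.count a := by simp [han] at h5' ⊢; omega
                exact List.count_pos_iff.mp (by omega)
              exact hc (by rw [show target - num = a by omega]; exact this)
          have hbpmem : b ∈ p := by
            rcases List.mem_append.mp h4 with h | h
            · exact h
            · exfalso
              have hbn : b = num := by simpa using h
              exact hc (by rw [show target - num = a by omega]; exact hap)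
          refine ⟨h1, h2, hap, hbpmem, fun heq => ?_⟩
          have h5' := h5 heq
          rw [hcount] at h5'
          by_cases hna : num = a
          · exact absurd (by rw [show target - num = a by omega]; exact hap) hc
          · simp [hna] at h5'; omega
      have hihr := ih (p ++ [num]) _ _ hs' hp' hsn' hpn
      simpa only [List.append_assoc, List.singleton_append] using hihr

-- membership in A's final pair set, expressed through B's per-key condition
lemma pairCond_iff_cond (arr : List Int) (target a b : Int) :
    PairCond arr target a b ↔
      (a ∈ arr ∧ ((a < target - a ∧ (target - a) ∈ arr) ∨ (a = target - a ∧ 2 ≤ arr.count a))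
        ∧ b = target - a) := by
  constructor
  · rintro ⟨h1, h2, h3, h4, h5⟩
    refine ⟨h3, ?_, by omega⟩
    rcases lt_or_eq_of_le h2 with h | h
    · exact Or.inl ⟨by omega, by rw [show target - a = b by omega]; exact h4⟩
    · exact Or.inr ⟨by omega, h5 h⟩
  · rintro ⟨h1, h2, rfl⟩
    rcases h2 with ⟨h2, h3⟩ | ⟨h2, h3⟩
    · exact ⟨by omega, by omega, h1, h3, fun h => by omega⟩
    · exact ⟨by omega, by omega, h1, by rw [← h2]; exact h1, fun _ => h3⟩

-- B's per-key condition over arr directly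
def condB (arr : List Int) (target num : Int) : Bool :=
  (decide (num < target - num) && decide ((target - num) ∈ arr)) ||
  (decide (num = target - num) && decide (2 ≤ arr.count num))

lemma B_eq (arr : List Int) (target : Int) :
    countDistinctPairs_alt arr target =
      ((PySem.Set.ofList arr).countP (condB arr target) : Int) := by
  unfold countDistinctPairs_alt
  have hkeys : (arr.foldl (fun d x => d.insert x (d.getD x 0 + 1))
      (PySem.Dict.empty : PySem.Dict Int Int)).keys = PySem.Set.ofList arr := by
    rw [PySem.Dict.keys_foldl_insert]
    exact PySem.Set.update_nil_left arr
  have hgetD : ∀ v, (arr.foldl (fun d x => d.insert x (d.getD x 0 + 1))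
      (PySem.Dict.empty : PySem.Dict Int Int)).getD v 0 = (arr.count v : Int) := by
    intro v
    rw [PySem.Dict.getD_foldl_insert_add_one]
    simp [PySem.Dict.getD, PySem.Dict.empty, PySem.Dict.get?]
  have hcont : ∀ v, (arr.foldl (fun d x => d.insert x (d.getD x 0 + 1))
      (PySem.Dict.empty : PySem.Dict Int Int)).contains v = decide (v ∈ arr) := by
    intro v
    have hiff := PySem.Dict.contains_iff_mem_keys
      (arr.foldl (fun d x => d.insert x (d.getD x 0 + 1)) (PySem.Dict.empty : PySem.Dict Int Int)) v
    rw [hkeys, PySem.Set.mem_ofList] at hiff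
    by_cases h : v ∈ arr
    · simp [hiff.mpr h, h]
    · simp only [h, decide_false]
      exact Bool.eq_false_iff.mpr (fun hb => h (hiff.mp hb))
  simp only [hkeys]
  have hfun : ∀ (c : Int) (num : Int),
      (let comp := target - num
       if num < comp ∧ (arr.foldl (fun d x => d.insert x (d.getD x 0 + 1))
          (PySem.Dict.empty : PySem.Dict Int Int)).contains comp then c + 1
       else if num = comp ∧ 2 ≤ (arr.foldl (fun d x => d.insert x (d.getD x 0 + 1))
          (PySem.Dict.empty : PySem.Dict Int Int)).getD num 0 then c + 1
       else c)
      = if condB arr target num then c + 1 else c := by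
    intro c num
    have hcast : (2 ≤ (arr.count num : Int)) ↔ 2 ≤ arr.count num := by exact_mod_cast Iff.rfl
    simp only [condB, hcont, hgetD, Bool.or_eq_true, Bool.and_eq_true, decide_eq_true_eq, hcast]
    split_ifs <;> tauto
  rw [show (fun (count num : Int) =>
       let comp := target - num
       if num < comp ∧ (arr.foldl (fun d x => d.insert x (d.getD x 0 + 1))
          (PySem.Dict.empty : PySem.Dict Int Int)).contains comp then count + 1
       else if num = comp ∧ 2 ≤ (arr.foldl (fun d x => d.insert x (d.getD x 0 + 1))
          (PySem.Dict.empty : PySem.Dict Int Int)).getD num 0 then count + 1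
       else count)
      = (fun (count num : Int) => if condB arr target num then count + 1 else count)
    from funext fun c => funext fun num => hfun c num]
  rw [PySem.List.foldl_count_if]
  simp

theorem countDistinctPairs_spec_aux (arr : List Int) (target : Int) :
    countDistinctPairs arr target = countDistinctPairs_alt arr target := by
  obtain ⟨hmem, hnd⟩ := foldA_invariant target arr [] PySem.Set.empty PySem.Set.empty
    (by intro x; simp [PySem.Set.empty]) (by intro a b; simp [PySem.Set.empty, PairCond])
    (by simp [PySem.Set.empty]) (by simp [PySem.Set.empty])
  simp only [List.nil_append] at hmem
  rw [B_eq]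
  unfold countDistinctPairs
  rw [List.countP_eq_length_filter]
  -- A's pair list is a permutation of the filtered distinct values, mapped to pairs
  have hKnd : ((PySem.Set.ofList arr).filter (condB arr target)).Nodup :=
    (PySem.Set.nodup_ofList arr).filter _
  have hmapnd : (((PySem.Set.ofList arr).filter (condB arr target)).map
      (fun k => (k, target - k))).Nodup :=
    hKnd.map (fun x y h => by rw [Prod.mk.injEq] at h; exact h.1)
  have hperm : (arr.foldl
      (fun (st : PySem.Set Int × PySem.Set (Int × Int)) num =>
        let complement := target - num
        let pairs := if PySem.Set.contains st.1 complement
                     then PySem.Set.add st.2 (pvSortPair num complement)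
                     else st.2
        (PySem.Set.add st.1 num, pairs)) (PySem.Set.empty, PySem.Set.empty)).2.Perm
      (((PySem.Set.ofList arr).filter (condB arr target)).map (fun k => (k, target - k))) := by
    rw [List.perm_ext_iff_of_nodup hnd hmapnd]
    rintro ⟨a, b⟩
    rw [hmem a b, pairCond_iff_cond]
    simp only [List.mem_map, List.mem_filter, PySem.Set.mem_ofList, condB]
    constructor
    · rintro ⟨h1, h2, rfl⟩
      exact ⟨a, ⟨h1, by simp; tauto⟩, rfl⟩
    · rintro ⟨k, ⟨hk1, hk2⟩, hk3⟩
      rw [Prod.mk.injEq] at hk3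
      obtain ⟨rfl, rfl⟩ := hk3
      simp at hk2
      exact ⟨hk1, by tauto, rfl⟩
  simp only [PySem.Set.len]
  rw [hperm.length_eq, List.length_map]

-- ===== VERDICT (by name: the statement is the Claim_ definition above) =====
theorem countDistinctPairs_spec : Claim_equal_countDistinctPairs := by
  intro arr target _
  exact countDistinctPairs_spec_aux arr target
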